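-- pv_equiv track=rewrite | github.com/mazharotago/biologyway2 | bioapps/dna_to_rna_converter.py | dna_to_rna_convert
-- ===== SOURCE A (Python) =====
-- def seq_evaluation(string):
--     eval_state = "good"
--     for nucleotide in string:
--         if nucleotide=="G" or nucleotide=="C" or nucleotide=="A" or nucleotide=="T":
--             if eval_state == "bad":
--                 return("bad")
--             else:
--                 eval_state="good"
--         else:
--             return ("bad")
--     return eval_state
--
-- def dna_to_rna_convert(string):
--     dna_seq = string
--     rna_seq = []
--     transcription_temp = {'G': 'G', 'A': 'A', 'C': 'C', 'T': "U"}
--     string_new = (((((dna_seq.replace("\n\r", "")).replace("\r\n", "")).replace("\r", "")).replace("\n", "")).upper()).replace(" ","")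
--     state = seq_evaluation(string_new)
--     if state=="good":
--         for i in string_new:
--             rna_seq.append(transcription_temp[i])
--         return(("".join(rna_seq)),state)
--     else:
--         return([string_new,state])
-- ===== SOURCE B (Python) =====
-- def dna_to_rna_convert(string):
--     # Single fused pass: validate and transcribe in one loop over the cleaned
--     # string, returning early on the first invalid nucleotide.
--     cleaned = string.replace("\n\r", "").replace("\r\n", "").replace("\r", "").replace("\n", "").upper().replace(" ", "")
--     transcription = {'G': 'G', 'A': 'A', 'C': 'C', 'T': 'U'}
--     out = []
--     for ch in cleaned:
--         mapped = transcription.get(ch)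
--         if mapped is None:
--             return [cleaned, "bad"]
--         out.append(mapped)
--     return ("".join(out), "good")
-- ===== Notes on version B (the rewrite author's own statement) =====
-- stated objective: simpler
-- what changed: Replaces the separate seq_evaluation validation pass followed by a second transcription loop with one fused loop that maps each cleaned character via the dict and returns early on the first non-nucleotide.
import Mathlib
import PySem

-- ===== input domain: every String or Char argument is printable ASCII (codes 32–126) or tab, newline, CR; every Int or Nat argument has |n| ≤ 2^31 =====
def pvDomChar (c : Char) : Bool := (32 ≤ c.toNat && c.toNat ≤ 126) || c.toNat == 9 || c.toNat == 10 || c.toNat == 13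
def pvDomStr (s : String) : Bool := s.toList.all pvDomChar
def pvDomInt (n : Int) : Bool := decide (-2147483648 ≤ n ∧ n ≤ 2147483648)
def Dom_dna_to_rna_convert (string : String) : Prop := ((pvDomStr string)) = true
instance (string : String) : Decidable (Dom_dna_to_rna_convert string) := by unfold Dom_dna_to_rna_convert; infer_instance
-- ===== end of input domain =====

-- B fuses A's validate-then-transcribe (helper + two loops) into one loop with early return; same values.
-- On "bad" inputs Python A returns a list [cleaned, "bad"]; per the fixed type convention both ports return the pair.

-- ===== PORT A =====
-- seq_evaluation, transliterated (the inner 'eval_state == "bad"' branch kept as written)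
def pvSeqEvalGo : List Char → String → String
  | [], st => st
  | c :: rest, st =>
    if c == 'G' || c == 'C' || c == 'A' || c == 'T' then
      (if st == "bad" then "bad" else pvSeqEvalGo rest "good")
    else "bad"

def seq_evaluation (s : String) : String := pvSeqEvalGo s.toList "good"

def dna_to_rna_convert (string : String) : String × String :=
  let dna_seq := string
  let transcription_temp : PySem.Dict Char Char := PySem.Dict.ofList [('G','G'),('A','A'),('C','C'),('T','U')]
  let string_new := PySem.Str.replace (PySem.Str.upper (PySem.Str.replace (PySem.Str.replace (PySem.Str.replace (PySem.Str.replace dna_seq "\n\r" "") "\r\n" "") "\r" "") "\n" "")) " " ""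
  let state := seq_evaluation string_new
  if state == "good" then
    -- transcription_temp[i]: a KeyError is impossible here (state is "good"), so the getD default is never used
    let rna_seq := string_new.toList.foldl (fun acc c => acc ++ [(transcription_temp.get? c).getD ' ']) []
    (String.mk rna_seq, state)
  else
    (string_new, state)

-- ===== PORT B =====
def pvAltLoop (transcription : PySem.Dict Char Char) (cleaned : String) : List Char → List Char → String × String
  | [], out => (String.mk out, "good")
  | c :: rest, out =>
    match transcription.get? c with
    | none => (cleaned, "bad")
    | some m => pvAltLoop transcription cleaned rest (out ++ [m])

def dna_to_rna_convert_alt (string : String) : String × String :=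
  let cleaned := PySem.Str.replace (PySem.Str.upper (PySem.Str.replace (PySem.Str.replace (PySem.Str.replace (PySem.Str.replace string "\n\r" "") "\r\n" "") "\r" "") "\n" "")) " " ""
  let transcription : PySem.Dict Char Char := PySem.Dict.ofList [('G','G'),('A','A'),('C','C'),('T','U')]
  pvAltLoop transcription cleaned cleaned.toList []

-- ===== PRECONDITION & SPEC =====
def Spec_dna_to_rna_convert (string : String) (out : String × String) : Prop := out = dna_to_rna_convert_alt string
instance (string : String) (out : String × String) : Decidable (Spec_dna_to_rna_convert string out) := by unfold Spec_dna_to_rna_convert; infer_instance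

-- ===== CLAIM (what is proved, stated in full; the proofs are below) =====
def Claim_equal_dna_to_rna_convert : Prop := ∀ (string : String), Dom_dna_to_rna_convert string → Spec_dna_to_rna_convert string (dna_to_rna_convert string)

-- ===== LEMMAS AND PROOFS =====

lemma pv_get_G : (PySem.Dict.ofList [('G','G'),('A','A'),('C','C'),('T','U')]).get? 'G' = some 'G' := by decide
lemma pv_get_C : (PySem.Dict.ofList [('G','G'),('A','A'),('C','C'),('T','U')]).get? 'C' = some 'C' := by decide
lemma pv_get_A : (PySem.Dict.ofList [('G','G'),('A','A'),('C','C'),('T','U')]).get? 'A' = some 'A' := by decide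
lemma pv_get_T : (PySem.Dict.ofList [('G','G'),('A','A'),('C','C'),('T','U')]).get? 'T' = some 'U' := by decide

lemma pv_get_invalid (c : Char) (hc : (c == 'G' || c == 'C' || c == 'A' || c == 'T') = false) :
    (PySem.Dict.ofList [('G','G'),('A','A'),('C','C'),('T','U')]).get? c = none := by
  simp only [Bool.or_eq_false_iff, beq_eq_false_iff_ne, ne_eq] at hc
  obtain ⟨⟨⟨n1, n2⟩, n3⟩, n4⟩ := hc
  have hd : PySem.Dict.ofList [('G','G'),('A','A'),('C','C'),('T','U')] =
      PySem.Dict.mk [('G','G'),('A','A'),('C','C'),('T','U')] := by decide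
  simp [hd, PySem.Dict.get?, Ne.symm n1, Ne.symm n2, Ne.symm n3, Ne.symm n4]

lemma pv_good_loop (cleaned : String) (cs : List Char) (out : List Char)
    (h : pvSeqEvalGo cs "good" = "good") :
    pvAltLoop (PySem.Dict.ofList [('G','G'),('A','A'),('C','C'),('T','U')]) cleaned cs out =
      (String.mk (cs.foldl (fun acc c => acc ++ [((PySem.Dict.ofList [('G','G'),('A','A'),('C','C'),('T','U')]).get? c).getD ' ']) out), "good") := by
  induction cs generalizing out with
  | nil => simp [pvAltLoop]
  | cons c rest ih =>
    simp only [pvSeqEvalGo] at h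
    by_cases hc : (c == 'G' || c == 'C' || c == 'A' || c == 'T') = true
    · rw [if_pos hc, if_neg (by decide)] at h
      have hc' : c = 'G' ∨ c = 'C' ∨ c = 'A' ∨ c = 'T' := by
        simpa only [Bool.or_eq_true, beq_iff_eq, or_assoc] using hc
      rcases hc' with h1 | h1 | h1 | h1 <;> subst h1 <;>
        simp only [pvAltLoop, pv_get_G, pv_get_C, pv_get_A, pv_get_T, List.foldl, Option.getD_some] <;>
        exact ih _ h
    · rw [if_neg hc] at h
      exact absurd h (by decide)

lemma pv_bad_loop (cleaned : String) (cs : List Char) (out : List Char)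
    (h : pvSeqEvalGo cs "good" ≠ "good") :
    pvAltLoop (PySem.Dict.ofList [('G','G'),('A','A'),('C','C'),('T','U')]) cleaned cs out = (cleaned, "bad") ∧
      pvSeqEvalGo cs "good" = "bad" := by
  induction cs generalizing out with
  | nil => exact absurd rfl h
  | cons c rest ih =>
    simp only [pvSeqEvalGo] at h ⊢
    by_cases hc : (c == 'G' || c == 'C' || c == 'A' || c == 'T') = true
    · rw [if_pos hc, if_neg (by decide)] at h ⊢
      have hc' : c = 'G' ∨ c = 'C' ∨ c = 'A' ∨ c = 'T' := by
        simpa only [Bool.or_eq_true, beq_iff_eq, or_assoc] using hc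
      rcases hc' with h1 | h1 | h1 | h1 <;> subst h1 <;>
        simp only [pvAltLoop, pv_get_G, pv_get_C, pv_get_A, pv_get_T] <;>
        exact ih _ h
    · have hcf : (c == 'G' || c == 'C' || c == 'A' || c == 'T') = false := by
        simpa using hc
      refine ⟨by simp [pvAltLoop, pv_get_invalid c hcf], by simp [hcf]⟩

lemma pv_main (cleaned : String) :
    (if (pvSeqEvalGo cleaned.toList "good" == "good") = true then
        (String.mk (cleaned.toList.foldl (fun acc c => acc ++ [((PySem.Dict.ofList [('G','G'),('A','A'),('C','C'),('T','U')]).get? c).getD ' ']) []),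
          pvSeqEvalGo cleaned.toList "good")
      else (cleaned, pvSeqEvalGo cleaned.toList "good"))
    = pvAltLoop (PySem.Dict.ofList [('G','G'),('A','A'),('C','C'),('T','U')]) cleaned cleaned.toList [] := by
  by_cases hg : pvSeqEvalGo cleaned.toList "good" = "good"
  · rw [pv_good_loop cleaned cleaned.toList [] hg, if_pos (by simp [hg]), hg]
  · obtain ⟨hb, hs⟩ := pv_bad_loop cleaned cleaned.toList [] hg
    rw [hb, if_neg (by simp [hs]), hs]

-- ===== VERDICT (by name: the statement is the Claim_ definition above) =====
theorem dna_to_rna_convert_spec : Claim_equal_dna_to_rna_convert := by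
  intro string _hdom
  unfold Spec_dna_to_rna_convert dna_to_rna_convert dna_to_rna_convert_alt seq_evaluation
  exact pv_main _
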